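-- pv_equiv track=rewrite | github.com/sasukepn1999/Robot_Find_Road | src/permutation.py | get_split_index
-- ===== SOURCE A (Python) =====
-- def get_split_index(A):
--     if len(A) == 0:
--         return -1
--     i = len(A) - 1
--     while i > 0:
--         if A[i] < A[i - 1]:
--             i -= 1
--         else:
--             break
--     return i - 1
-- ===== SOURCE B (Python) =====
-- def get_split_index(A):
--     ans = -1
--     for k in range(len(A) - 1):
--         if A[k] <= A[k + 1]:
--             ans = k
--     return ans
-- ===== Notes on version B (the rewrite author's own statement) =====
-- stated objective: simpler
-- what changed: Replaces the backward while-loop that decrements a pointer from the end through the strictly decreasing suffix with a single forward pass that keeps the last index k with A[k] <= A[k+1] (default -1), removing the special empty-list branch and the pointer arithmetic.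
import Mathlib
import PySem

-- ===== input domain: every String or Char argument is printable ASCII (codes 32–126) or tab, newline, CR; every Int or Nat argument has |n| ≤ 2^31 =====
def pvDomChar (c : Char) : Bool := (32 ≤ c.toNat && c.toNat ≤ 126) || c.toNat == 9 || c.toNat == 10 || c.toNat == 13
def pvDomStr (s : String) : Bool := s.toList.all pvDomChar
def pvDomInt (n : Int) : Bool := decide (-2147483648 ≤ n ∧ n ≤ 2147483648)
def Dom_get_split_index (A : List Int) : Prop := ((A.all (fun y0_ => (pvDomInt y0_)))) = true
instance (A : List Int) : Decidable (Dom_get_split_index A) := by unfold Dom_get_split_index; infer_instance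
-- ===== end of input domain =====

-- ===== PORT A =====
-- B replaces A's backward while-loop with a forward pass keeping the last index k with A[k] <= A[k+1].
-- while i > 0: if A[i] < A[i-1]: i -= 1 else: break   (indices always in range, so pyGetD is exact here)
def pvLoopA (A : List Int) : Nat → Nat
  | 0 => 0
  | (i+1) =>
      if PySem.List.pyGetD A ((i+1 : Nat) : Int) 0 < PySem.List.pyGetD A ((i : Nat) : Int) 0 then
        pvLoopA A i
      else i+1

def get_split_index (A : List Int) : Int :=
  if A.length = 0 then -1
  else (pvLoopA A (A.length - 1) : Int) - 1

-- ===== PORT B =====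
def get_split_index_alt (A : List Int) : Int :=
  (PySem.List.pyRange 0 ((A.length : Int) - 1) 1).foldl
    (fun ans k => if PySem.List.pyGetD A k 0 ≤ PySem.List.pyGetD A (k+1) 0 then k else ans) (-1)

-- ===== PRECONDITION & SPEC =====
def Spec_get_split_index (A : List Int) (out : Int) : Prop := out = get_split_index_alt A
instance (A : List Int) (out : Int) : Decidable (Spec_get_split_index A out) := by unfold Spec_get_split_index; infer_instance

-- ===== CLAIM (what is proved, stated in full; the proofs are below) =====
def Claim_equal_get_split_index : Prop := ∀ (A : List Int), Dom_get_split_index A → Spec_get_split_index A (get_split_index A)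

-- ===== LEMMAS AND PROOFS =====

-- ===== VERDICT (by name: the statement is the Claim_ definition above) =====
theorem pvLoop_eq_fold (A : List Int) (i : Nat) :
    (pvLoopA A i : Int) - 1 =
      (PySem.List.pyRange 0 (i : Int) 1).foldl
        (fun ans k => if PySem.List.pyGetD A k 0 ≤ PySem.List.pyGetD A (k+1) 0 then k else ans) (-1) := by
  induction i with
  | zero => simp [pvLoopA, PySem.List.pyRange_one_eq_nil]
  | succ i ih =>
      have hsplit : PySem.List.pyRange 0 ((i+1 : Nat) : Int) 1 =
          PySem.List.pyRange 0 (i : Int) 1 ++ [(i : Int)] := by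
        push_cast
        exact PySem.List.pyRange_one_succ_right (by positivity)
      rw [hsplit, List.foldl_append]
      simp only [List.foldl_cons, List.foldl_nil]
      by_cases h : PySem.List.pyGetD A ((i+1 : Nat) : Int) 0 < PySem.List.pyGetD A ((i : Nat) : Int) 0
      · have hcond : ¬ PySem.List.pyGetD A ((i : Nat) : Int) 0 ≤ PySem.List.pyGetD A (((i : Nat) : Int) + 1) 0 := by
          push_cast at h ⊢; omega
        rw [if_neg hcond]
        simp only [pvLoopA]
        rw [if_pos h]
        exact ih
      · have hcond : PySem.List.pyGetD A ((i : Nat) : Int) 0 ≤ PySem.List.pyGetD A (((i : Nat) : Int) + 1) 0 := by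
          push_cast at h ⊢; omega
        rw [if_pos hcond]
        simp only [pvLoopA]
        rw [if_neg h]
        push_cast
        ring

theorem get_split_index_spec : Claim_equal_get_split_index := by
  intro A _
  unfold Spec_get_split_index get_split_index get_split_index_alt
  by_cases hA : A.length = 0
  · simp [hA, PySem.List.pyRange_one_eq_nil]
  · rw [if_neg hA]
    have h1 : ((A.length - 1 : Nat) : Int) = (A.length : Int) - 1 := by omega
    rw [pvLoop_eq_fold, h1]
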